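-- pv_equiv track=rewrite | github.com/lulu1373/sop-supervisor-agent | supervisor/core/engine.py | _normalize_job_id
-- ===== SOURCE A (Python) =====
-- def _normalize_job_id(raw: object) -> str:
--     if raw is None:
--         return ""
--     text = str(raw).strip()
--     if not text:
--         return ""
--     normalized = []
--     for char in text:
--         if char.isalnum() or char in {"-", "_"}:
--             normalized.append(char)
--         elif char.isspace() or char in {"/", ":", "."}:
--             normalized.append("-")
--         else:
--             normalized.append("-")
--     cleaned = "".join(normalized).strip("-")
--     while "--" in cleaned:
--         cleaned = cleaned.replace("--", "-")
--     return cleaned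
-- ===== SOURCE B (Python) =====
-- def _normalize_job_id(raw: object) -> str:
--     if raw is None:
--         return ""
--     text = str(raw).strip()
--     if not text:
--         return ""
--     segments = []
--     cur = []
--     for ch in text:
--         if ch.isalnum() or ch == "_":
--             cur.append(ch)
--         else:
--             if cur:
--                 segments.append("".join(cur))
--             cur = []
--     if cur:
--         segments.append("".join(cur))
--     return "-".join(segments)
-- ===== Notes on version B (the rewrite author's own statement) =====
-- stated objective: simpler
-- what changed: B replaces A's per-character keep-or-dash mapping, edge strip and repeated double-dash collapse loop by a single grouping pass that collects maximal runs of alnum/underscore characters and joins the runs with single dashes.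
import Mathlib
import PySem

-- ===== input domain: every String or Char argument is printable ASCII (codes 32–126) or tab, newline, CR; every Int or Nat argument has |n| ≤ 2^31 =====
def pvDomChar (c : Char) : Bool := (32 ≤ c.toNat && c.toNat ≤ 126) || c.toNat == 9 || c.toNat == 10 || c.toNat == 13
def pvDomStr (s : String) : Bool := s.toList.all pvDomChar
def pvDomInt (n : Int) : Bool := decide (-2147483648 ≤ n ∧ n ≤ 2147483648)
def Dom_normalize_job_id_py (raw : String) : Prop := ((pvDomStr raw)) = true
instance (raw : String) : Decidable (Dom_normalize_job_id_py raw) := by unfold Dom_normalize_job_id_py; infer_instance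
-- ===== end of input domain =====

-- B is a single grouping pass (collect maximal alnum/underscore runs, join with '-') replacing
-- A's map-to-char-or-dash pass + strip('-') + repeated replace('--','-') collapse loop.

-- ===== PORT A =====
-- helper for A's `while "--" in cleaned: cleaned = cleaned.replace("--", "-")` loop:
-- pvRepList is one `replace("--", "-")` pass (proved equal to PySem.Chars.replace below),
-- used only to justify termination of the while loop.
def pvRepList : List Char → List Char
  | [] => []
  | [c] => [c]
  | c :: d :: t => if c = '-' ∧ d = '-' then '-' :: pvRepList t else c :: pvRepList (d :: t)

theorem pvGo_spec : ∀ (fuel : Nat) (l acc : List Char), l.length ≤ fuel →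
    PySem.Chars.replace.go ['-', '-'] ['-'] fuel l acc = acc.reverse ++ pvRepList l := by
  intro fuel
  induction fuel with
  | zero =>
    intro l acc h
    have : l = [] := List.eq_nil_of_length_eq_zero (Nat.le_zero.mp h)
    subst this
    simp [PySem.Chars.replace.go, pvRepList]
  | succ n ih =>
    intro l acc h
    match l with
    | [] => simp [PySem.Chars.replace.go, pvRepList]
    | [c] =>
      rw [PySem.Chars.replace.go]
      have hpre : List.isPrefixOf ['-', '-'] [c] = false := by
        simp [List.isPrefixOf]
      simp only [hpre, Bool.false_eq_true, if_false]
      rw [ih [] (c :: acc) (by simp)]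
      simp [pvRepList]
    | c :: d :: t =>
      by_cases hcd : c = '-' ∧ d = '-'
      · obtain ⟨hc, hd⟩ := hcd
        subst hc; subst hd
        have ht : t.length ≤ n := by simp at h; omega
        simp [PySem.Chars.replace.go, List.isPrefixOf, pvRepList, ih t _ ht]
      · have hpre : List.isPrefixOf ['-', '-'] (c :: d :: t) = false := by
          simp only [List.isPrefixOf]
          simp only [Bool.and_eq_false_iff]
          by_cases hc : c = '-'
          · subst hc
            rcases not_and_or.mp hcd with hc' | hd
            · exact absurd rfl hc'
            · refine Or.inr ?_
              simp [List.isPrefixOf]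
              intro h'; exact hd h'.symm
          · refine Or.inl ?_
            simp
            intro h'; exact hc h'.symm
        have ht : (d :: t).length ≤ n := by simp at h ⊢; omega
        rw [PySem.Chars.replace.go]
        simp only [hpre, Bool.false_eq_true, if_false]
        rw [ih (d :: t) (c :: acc) ht]
        have : pvRepList (c :: d :: t) = c :: pvRepList (d :: t) := by
          simp [pvRepList, hcd]
        simp [this]

theorem pvReplace_eq (s : List Char) :
    PySem.Chars.replace s ['-', '-'] ['-'] = pvRepList s := by
  rw [PySem.Chars.replace]
  simp [pvGo_spec s.length s [] (le_refl _)]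

theorem pvRepList_length_le : ∀ s : List Char, (pvRepList s).length ≤ s.length := by
  intro s
  induction s using pvRepList.induct with
  | case1 => simp [pvRepList]
  | case2 c => simp [pvRepList]
  | case3 c d t hcd ih => simp [pvRepList, hcd]; omega
  | case4 c d t hcd ih => simp [pvRepList, hcd] at ih ⊢; omega

theorem pvRepList_length_lt : ∀ s : List Char, ['-', '-'] <:+: s → (pvRepList s).length < s.length := by
  intro s
  induction s using pvRepList.induct with
  | case1 => intro h; exact absurd (List.eq_nil_of_infix_nil h) (by simp)
  | case2 c =>
    intro h
    have := h.length_le; simp at this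
  | case3 c d t hcd ih =>
    intro _
    have := pvRepList_length_le t
    simp [pvRepList, hcd]; omega
  | case4 c d t hcd ih =>
    intro h
    rcases List.infix_cons_iff.mp h with hp | hi
    · rcases hp with ⟨u, hu⟩
      simp at hu
      exact absurd ⟨hu.1.symm, hu.2.1.symm⟩ hcd
    · have := ih hi
      simp [pvRepList, hcd] at this ⊢; omega

def pvCollapseLoop (s : List Char) : List Char :=
  if h : PySem.Chars.isIn ['-', '-'] s = true then
    pvCollapseLoop (PySem.Chars.replace s ['-', '-'] ['-'])
  else s
termination_by s.length
decreasing_by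
  rw [pvReplace_eq]
  exact pvRepList_length_lt s ((PySem.Chars.isIn_iff_infix _ _).mp h)

-- raw : String can never be Python's None, so A's `raw is None` branch cannot fire; str(raw) = raw
def normalize_job_id_py (raw : String) : String :=
  let text := PySem.Chars.strip raw.toList
  if text.isEmpty then "" else
    let normalized := text.foldl (fun acc c =>
      if PySem.Chars.isalnum c || c == '-' || c == '_' then acc ++ [c]
      else if PySem.Chars.isspace c || c == '/' || c == ':' || c == '.' then acc ++ ['-']
      else acc ++ ['-']) []
    let cleaned := PySem.Chars.stripChars normalized ['-']
    String.mk (pvCollapseLoop cleaned)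

-- ===== PORT B =====
def normalize_job_id_py_alt (raw : String) : String :=
  let text := PySem.Chars.strip raw.toList
  if text.isEmpty then "" else
    let st := text.foldl (fun (st : List (List Char) × List Char) c =>
      if PySem.Chars.isalnum c || c == '_' then (st.1, st.2 ++ [c])
      else if st.2.isEmpty then (st.1, [])
      else (st.1 ++ [st.2], [])) ([], [])
    let segments := if st.2.isEmpty then st.1 else st.1 ++ [st.2]
    String.mk (PySem.Chars.join ['-'] segments)

-- ===== PRECONDITION & SPEC =====
def Spec_normalize_job_id_py (raw : String) (out : String) : Prop := out = normalize_job_id_py_alt raw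
instance (raw : String) (out : String) : Decidable (Spec_normalize_job_id_py raw out) := by unfold Spec_normalize_job_id_py; infer_instance

-- ===== CLAIM (what is proved, stated in full; the proofs are below) =====
def Claim_equal_normalize_job_id_py : Prop := ∀ (raw : String), Dom_normalize_job_id_py raw → Spec_normalize_job_id_py raw (normalize_job_id_py raw)

-- ===== LEMMAS AND PROOFS =====

def pvTok (c : Char) : Bool := PySem.Chars.isalnum c || c == '_'
def pvG (c : Char) : Char := if pvTok c then c else '-'
def pvDash (c : Char) : Bool := c == '-'

def pvCollapse : List Char → List Char
  | [] => []
  | [c] => [c]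
  | c :: d :: t => if c = '-' ∧ d = '-' then pvCollapse (d :: t) else c :: pvCollapse (d :: t)

def pvPGroup (cur : List Char) : List Char → List (List Char)
  | [] => if cur.isEmpty then [] else [cur]
  | c :: cs => if pvTok c then pvPGroup (cur ++ [c]) cs
               else if cur.isEmpty then pvPGroup [] cs
               else cur :: pvPGroup [] cs

def pvRstrip (s : List Char) : List Char := (List.dropWhile pvDash s.reverse).reverse

def pvStripDash (s : List Char) : List Char := pvRstrip (List.dropWhile pvDash s)

theorem pvTok_ne_dash {c : Char} (h : pvTok c = true) : pvDash c = false := by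
  by_cases hc : c = '-'
  · subst hc; exact absurd h (by decide)
  · simp [pvDash, hc]

theorem pvG_tok {c : Char} (h : pvTok c = true) : pvG c = c := by simp [pvG, h]
theorem pvG_nontok {c : Char} (h : pvTok c = false) : pvG c = '-' := by simp [pvG, h]

theorem pvStripChars_eq (s : List Char) : PySem.Chars.stripChars s ['-'] = pvStripDash s := by
  have hp : (fun (c : Char) => decide (c = '-')) = pvDash := by
    funext c; by_cases hc : c = '-' <;> simp [hc, pvDash]
  simp only [PySem.Chars.stripChars, pvStripDash, pvRstrip]
  simp [hp]

-- A's per-char loop is `map pvG`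
theorem pvAFold_eq (t : List Char) :
    t.foldl (fun acc c =>
      if PySem.Chars.isalnum c || c == '-' || c == '_' then acc ++ [c]
      else if PySem.Chars.isspace c || c == '/' || c == ':' || c == '.' then acc ++ ['-']
      else acc ++ ['-']) [] = t.map pvG := by
  have hfun : (fun (acc : List Char) c =>
      if PySem.Chars.isalnum c || c == '-' || c == '_' then acc ++ [c]
      else if PySem.Chars.isspace c || c == '/' || c == ':' || c == '.' then acc ++ ['-']
      else acc ++ ['-']) = fun acc c => acc ++ [pvG c] := by
    funext acc c
    by_cases hc : c = '-'
    · subst hc; simp [pvG, pvTok]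
    · by_cases ht : pvTok c = true
      · have : (PySem.Chars.isalnum c || c == '-' || c == '_') = true := by
          simp [pvTok] at ht; rcases ht with h | h <;> simp [h]
        simp [this, pvG_tok ht]
      · have ht' : pvTok c = false := by simpa using ht
        have h1 : PySem.Chars.isalnum c = false := by
          simp [pvTok] at ht'; exact ht'.1
        have h2 : (c == '_') = false := by
          simp [pvTok] at ht'; simpa using ht'.2
        simp [h1, h2, hc, pvG_nontok ht']
  rw [hfun]
  simpa using PySem.List.foldl_append_singleton_eq_map (f := pvG) (l := t) (acc := [])

-- B's loop computes pvPGroup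
theorem pvBFold_eq : ∀ (t : List Char) (segs : List (List Char)) (cur : List Char),
    (let st := t.foldl (fun (st : List (List Char) × List Char) c =>
      if PySem.Chars.isalnum c || c == '_' then (st.1, st.2 ++ [c])
      else if st.2.isEmpty then (st.1, [])
      else (st.1 ++ [st.2], [])) (segs, cur)
     if st.2.isEmpty then st.1 else st.1 ++ [st.2]) = segs ++ pvPGroup cur t := by
  intro t
  induction t with
  | nil =>
    intro segs cur
    by_cases h : cur.isEmpty <;> simp_all [pvPGroup]
  | cons c cs ih =>
    intro segs cur
    by_cases ht : pvTok c = true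
    · have : (PySem.Chars.isalnum c || c == '_') = true := by simpa [pvTok] using ht
      simp only [List.foldl_cons, this, if_pos rfl]
      simpa [pvPGroup, ht] using ih segs (cur ++ [c])
    · have hal : (PySem.Chars.isalnum c || c == '_') = false := by simpa [pvTok] using ht
      by_cases hc : cur.isEmpty
      · simp only [List.foldl_cons, hal, Bool.false_eq_true, if_false, hc, if_pos rfl]
        have hcur : cur = [] := by simpa [List.isEmpty_iff] using hc
        subst hcur
        simpa [pvPGroup, ht] using ih segs []
      · simp only [List.foldl_cons, hal, Bool.false_eq_true, if_false, hc, if_false]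
        rw [ih (segs ++ [cur]) []]
        simp [pvPGroup, ht, hc]

-- join lemmas
theorem pvJoin_nil : PySem.Chars.join ['-'] [] = [] := by
  simp [PySem.Chars.join, List.intercalate]

theorem pvJoin_single (x : List Char) : PySem.Chars.join ['-'] [x] = x := by
  simp [PySem.Chars.join, List.intercalate, List.intersperse]

theorem pvJoin_cons (x : List Char) (xs : List (List Char)) (h : xs ≠ []) :
    PySem.Chars.join ['-'] (x :: xs) = x ++ '-' :: PySem.Chars.join ['-'] xs := by
  match xs with
  | [] => exact absurd rfl h
  | y :: ys => simp [PySem.Chars.join, List.intercalate, List.intersperse]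

-- pvCollapse / pvRepList structural lemmas
theorem pvCollapse_cons_nondash {c : Char} (h : c ≠ '-') (t : List Char) :
    pvCollapse (c :: t) = c :: pvCollapse t := by
  match t with
  | [] => simp [pvCollapse]
  | d :: t' => simp [pvCollapse, h]

theorem pvCollapse_append_nondash : ∀ (a y : List Char), (∀ c ∈ a, c ≠ '-') →
    pvCollapse (a ++ y) = a ++ pvCollapse y := by
  intro a
  induction a with
  | nil => simp
  | cons c a' ih =>
    intro y h
    have hc : c ≠ '-' := h c (by simp)
    rw [List.cons_append, pvCollapse_cons_nondash hc, ih y (fun x hx => h x (by simp [hx]))]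
    simp

theorem pvCollapse_dashes : ∀ (k : Nat) (w : List Char), 1 ≤ k →
    (w = [] ∨ ∃ c t, w = c :: t ∧ c ≠ '-') →
    pvCollapse (List.replicate k '-' ++ w) = '-' :: pvCollapse w := by
  intro k
  induction k with
  | zero => omega
  | succ n ih =>
    intro w _ hw
    by_cases hn : n = 0
    · subst hn
      rcases hw with h | ⟨c, t, hct, hc⟩
      · subst h; simp [pvCollapse]
      · subst hct; simp [pvCollapse, hc]
    · have hrep : List.replicate (n + 1) '-' ++ w = '-' :: (List.replicate n '-' ++ w) := by
        simp [List.replicate_succ]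
      rw [hrep]
      have hrep2 : List.replicate n '-' ++ w = '-' :: (List.replicate (n - 1) '-' ++ w) := by
        have : n = (n - 1) + 1 := by omega
        rw [this, List.replicate_succ]; simp
      rw [hrep2, pvCollapse, if_pos ⟨rfl, rfl⟩, ← hrep2]
      exact ih w (by omega) hw

theorem pvRepList_dashes : ∀ (k : Nat) (w : List Char),
    (w = [] ∨ ∃ c t, w = c :: t ∧ c ≠ '-') →
    pvRepList (List.replicate k '-' ++ w) = List.replicate (k - k / 2) '-' ++ pvRepList w := by
  intro k
  induction k using Nat.strong_induction_on with
  | _ k ih =>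
    intro w hw
    match k with
    | 0 => simp
    | 1 =>
      rcases hw with h | ⟨c, t, hct, hc⟩
      · subst h; simp [pvRepList]
      · subst hct; simp [pvRepList, hc, List.replicate_succ]
    | (m + 2) =>
      have hrep : List.replicate (m + 2) '-' ++ w = '-' :: '-' :: (List.replicate m '-' ++ w) := by
        simp [List.replicate_succ]
      rw [hrep, pvRepList, if_pos ⟨rfl, rfl⟩, ih m (by omega) w hw]
      have harith : (m + 2) - (m + 2) / 2 = (m - m / 2) + 1 := by omega
      rw [harith, List.replicate_succ]
      simp

-- decomposition of a list by its leading dash-run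
theorem pvDash_decomp (s : List Char) :
    s = List.replicate (s.takeWhile pvDash).length '-' ++ s.dropWhile pvDash := by
  have h1 : s.takeWhile pvDash = List.replicate (s.takeWhile pvDash).length '-' := by
    apply List.eq_replicate_of_mem
    intro c hc
    have := List.mem_takeWhile_imp hc
    simpa [pvDash] using this
  conv_lhs => rw [← List.takeWhile_append_dropWhile (p := pvDash) (l := s)]
  rw [← h1]

theorem pvDropWhile_head_shape (p : Char → Bool) (s : List Char) :
    s.dropWhile p = [] ∨ ∃ c t, s.dropWhile p = c :: t ∧ p c = false := by
  match h : s.dropWhile p with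
  | [] => exact Or.inl rfl
  | c :: t =>
    refine Or.inr ⟨c, t, rfl, ?_⟩
    have := List.head?_dropWhile_not p s
    rw [h] at this; simpa using this

theorem pvCollapse_repList_fuel : ∀ (n : Nat) (s : List Char), s.length ≤ n →
    pvCollapse (pvRepList s) = pvCollapse s := by
  intro n
  induction n with
  | zero =>
    intro s h
    have : s = [] := List.eq_nil_of_length_eq_zero (Nat.le_zero.mp h)
    subst this; rfl
  | succ N ihn =>
    intro s hsn
    have ih : ∀ w : List Char, w.length < s.length → pvCollapse (pvRepList w) = pvCollapse w := by
      intro w hw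
      exact ihn w (by omega)
    match s with
    | [] => rfl
    | c :: t =>
      by_cases hc : c = '-'
      · subst hc
        obtain ⟨k, hk⟩ : ∃ k, k = (('-' :: t).takeWhile pvDash).length := ⟨_, rfl⟩
        have hk1 : 1 ≤ k := by
          rw [hk]; simp [List.takeWhile_cons, pvDash]
        obtain ⟨w, hwdef⟩ : ∃ w, w = ('-' :: t).dropWhile pvDash := ⟨_, rfl⟩
        have hdec : '-' :: t = List.replicate k '-' ++ w := by
          rw [hk, hwdef]; exact pvDash_decomp ('-' :: t)
        have hwshape : w = [] ∨ ∃ c' t', w = c' :: t' ∧ pvDash c' = false := by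
          rw [hwdef]; exact pvDropWhile_head_shape pvDash ('-' :: t)
        have hwshape' : w = [] ∨ ∃ c' t', w = c' :: t' ∧ c' ≠ '-' := by
          rcases hwshape with h | ⟨c', t', h1, h2⟩
          · exact Or.inl h
          · exact Or.inr ⟨c', t', h1, by simpa [pvDash] using h2⟩
        have hwlen : w.length < ('-' :: t).length := by
          have h1 : w = List.dropWhile pvDash t := by
            rw [hwdef]; simp [List.dropWhile_cons, pvDash]
          have h2 := List.length_dropWhile_le pvDash t
          rw [h1]; simp; omega
        have hrw : pvRepList (List.replicate k '-' ++ w)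
            = List.replicate (k - k / 2) '-' ++ pvRepList w := pvRepList_dashes k w hwshape'
        have hrepshape : pvRepList w = [] ∨ ∃ c' t', pvRepList w = c' :: t' ∧ c' ≠ '-' := by
          rcases hwshape' with h | ⟨c', t', h1, h2⟩
          · subst h; exact Or.inl rfl
          · subst h1
            match t' with
            | [] => exact Or.inr ⟨c', [], by simp [pvRepList], h2⟩
            | d :: t'' =>
              have : ¬ (c' = '-' ∧ d = '-') := fun ⟨h3, _⟩ => h2 h3
              exact Or.inr ⟨c', pvRepList (d :: t''), by simp [pvRepList, this], h2⟩
        calc pvCollapse (pvRepList ('-' :: t))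
            = pvCollapse (List.replicate (k - k / 2) '-' ++ pvRepList w) := by rw [hdec, hrw]
          _ = '-' :: pvCollapse (pvRepList w) := pvCollapse_dashes _ _ (by omega) hrepshape
          _ = '-' :: pvCollapse w := by
              rw [ih w hwlen]
          _ = pvCollapse (List.replicate k '-' ++ w) := (pvCollapse_dashes k w hk1 hwshape').symm
          _ = pvCollapse ('-' :: t) := by rw [← hdec]
      · have hrl : pvRepList (c :: t) = c :: pvRepList t := by
          match t with
          | [] => simp [pvRepList]
          | d :: t' =>
            have hng : ¬(c = '-' ∧ d = '-') := by rintro ⟨hh, _⟩; exact hc hh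
            rw [show pvRepList (c :: d :: t')
                = if c = '-' ∧ d = '-' then '-' :: pvRepList t' else c :: pvRepList (d :: t')
              from rfl, if_neg hng]
        rw [hrl, pvCollapse_cons_nondash hc, ih t (by simp),
          pvCollapse_cons_nondash hc]

theorem pvCollapse_repList (s : List Char) : pvCollapse (pvRepList s) = pvCollapse s :=
  pvCollapse_repList_fuel s.length s (le_refl _)

theorem pvCollapse_of_no_dd : ∀ s : List Char, ¬ (['-', '-'] <:+: s) → pvCollapse s = s := by
  intro s
  induction s with
  | nil => intro _; rfl
  | cons c t ih =>
    intro h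
    have ht : ¬ (['-', '-'] <:+: t) := fun hi => h (hi.trans (List.infix_cons_iff.mpr (Or.inr (List.infix_rfl)))) 
    match t with
    | [] => simp [pvCollapse]
    | d :: t' =>
      have hcd : ¬ (c = '-' ∧ d = '-') := by
        rintro ⟨rfl, rfl⟩
        exact h ⟨[], t', rfl⟩
      simp [pvCollapse, hcd, ih ht]

theorem pvLoop_eq_collapse_fuel : ∀ (n : Nat) (s : List Char), s.length ≤ n →
    pvCollapseLoop s = pvCollapse s := by
  intro n
  induction n with
  | zero =>
    intro s h
    have : s = [] := List.eq_nil_of_length_eq_zero (Nat.le_zero.mp h)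
    subst this
    rw [pvCollapseLoop, dif_neg (by decide)]
    rfl
  | succ N ihn =>
    intro s hsn
    rw [pvCollapseLoop]
    by_cases h : PySem.Chars.isIn ['-', '-'] s = true
    · rw [dif_pos h, pvReplace_eq]
      have hlt := pvRepList_length_lt s ((PySem.Chars.isIn_iff_infix _ _).mp h)
      rw [ihn (pvRepList s) (by omega), pvCollapse_repList]
    · rw [dif_neg h]
      have := (PySem.Chars.isIn_eq_false_iff ['-', '-'] s).mp (by simpa using h)
      exact (pvCollapse_of_no_dd s this).symm

theorem pvLoop_eq_collapse (s : List Char) : pvCollapseLoop s = pvCollapse s :=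
  pvLoop_eq_collapse_fuel s.length s (le_refl _)

-- pvPGroup lemmas
theorem pvPGroup_ne_nil : ∀ (t cur : List Char), cur ≠ [] → pvPGroup cur t ≠ [] := by
  intro t
  induction t with
  | nil => intro cur h; simp [pvPGroup, h]
  | cons c cs ih =>
    intro cur h
    by_cases ht : pvTok c = true
    · simpa [pvPGroup, ht] using ih (cur ++ [c]) (by simp)
    · simp [pvPGroup, ht, List.isEmpty_iff, h]

theorem pvPGroup_skip_nontok : ∀ t : List Char,
    pvPGroup [] (t.dropWhile (fun c => !pvTok c)) = pvPGroup [] t := by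
  intro t
  induction t with
  | nil => rfl
  | cons c cs ih =>
    by_cases ht : pvTok c = true
    · simp [List.dropWhile_cons, ht]
    · simp only [List.dropWhile_cons, ht]
      simpa [pvPGroup, ht] using ih

theorem pvPGroup_all_nontok : ∀ t : List Char, (∀ c ∈ t, pvTok c = false) → pvPGroup [] t = [] := by
  intro t
  induction t with
  | nil => intro _; rfl
  | cons c cs ih =>
    intro h
    have hc := h c (by simp)
    simp [pvPGroup, hc]
    exact ih (fun x hx => h x (by simp [hx]))

theorem pvPGroup_tok_prefix : ∀ (a : List Char) (cur r : List Char), (∀ c ∈ a, pvTok c = true) →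
    pvPGroup cur (a ++ r) = pvPGroup (cur ++ a) r := by
  intro a
  induction a with
  | nil => simp
  | cons c a' ih =>
    intro cur r h
    have hc := h c (by simp)
    simp only [List.cons_append, pvPGroup, hc, if_pos rfl]
    rw [ih (cur ++ [c]) r (fun x hx => h x (by simp [hx]))]
    simp

-- map pvG lemmas
theorem pvMap_tok {a : List Char} (h : ∀ c ∈ a, pvTok c = true) : a.map pvG = a := by
  induction a with
  | nil => rfl
  | cons c a' ih =>
    simp [pvG_tok (h c (by simp)), ih (fun x hx => h x (by simp [hx]))]

theorem pvMap_nontok {b : List Char} (h : ∀ c ∈ b, pvTok c = false) :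
    b.map pvG = List.replicate b.length '-' := by
  induction b with
  | nil => rfl
  | cons c b' ih =>
    simp [List.replicate_succ, pvG_nontok (h c (by simp)), ih (fun x hx => h x (by simp [hx]))]

theorem pvDropDash_map (t : List Char) :
    List.dropWhile pvDash (t.map pvG) = (t.dropWhile (fun c => !pvTok c)).map pvG := by
  induction t with
  | nil => rfl
  | cons c cs ih =>
    by_cases ht : pvTok c = true
    · have h1 : pvDash (pvG c) = false := by rw [pvG_tok ht]; exact pvTok_ne_dash ht
      have h0 : pvDash c = false := pvTok_ne_dash ht
      simp [List.dropWhile_cons, h1, h0, ht, pvG_tok ht]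
    · have ht' : pvTok c = false := by simpa using ht
      have h1 : pvDash (pvG c) = true := by rw [pvG_nontok ht']; rfl
      simp [List.dropWhile_cons, h1, ht', ih]

-- rstrip lemmas
theorem pvDropWhile_all_false {p : Char → Bool} : ∀ {z : List Char}, (∀ c ∈ z, p c = false) →
    List.dropWhile p z = z := by
  intro z h
  match z with
  | [] => rfl
  | c :: t => simp [List.dropWhile_cons, h c (by simp)]

theorem pvDropWhile_replicate_append (n : Nat) (z : List Char) :
    List.dropWhile pvDash (List.replicate n '-' ++ z) = List.dropWhile pvDash z := by
  induction n with
  | zero => simp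
  | succ m ih => simp [List.replicate_succ, List.dropWhile_cons, pvDash, ih]

theorem pvRstrip_append_keep (x y : List Char) (hy : ∃ c ∈ y, pvDash c = false) :
    pvRstrip (x ++ y) = x ++ pvRstrip y := by
  rcases hy with ⟨c, hc, hcd⟩
  have hne : List.dropWhile pvDash y.reverse ≠ [] := by
    intro h
    have := List.dropWhile_eq_nil_iff.mp h c (by simpa using hc)
    rw [hcd] at this; exact absurd this (by simp)
  simp only [pvRstrip, List.reverse_append, List.dropWhile_append,
    List.isEmpty_iff, if_neg hne]
  simp

theorem pvRstrip_kill_dashes (x : List Char) (n : Nat) (hx : ∀ c ∈ x, pvDash c = false) :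
    pvRstrip (x ++ List.replicate n '-') = x := by
  simp only [pvRstrip, List.reverse_append]
  have h1 : (List.replicate n '-').reverse = List.replicate n '-' := by simp
  rw [h1, pvDropWhile_replicate_append, pvDropWhile_all_false (by simpa using hx)]
  simp

theorem pvRstrip_cons_nondash {c : Char} (hc : pvDash c = false) (z : List Char) :
    pvRstrip (c :: z) = c :: pvRstrip z := by
  have : c :: z = [c] ++ z := rfl
  rw [this]
  by_cases hz : ∃ d ∈ z, pvDash d = false
  · rw [pvRstrip_append_keep [c] z hz]; rfl
  · have hall : ∀ d ∈ z, pvDash d = true := by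
      intro d hd
      by_contra h
      exact hz ⟨d, hd, by simpa using h⟩
    have hz' : z = List.replicate z.length '-' := by
      apply List.eq_replicate_of_mem
      intro d hd
      have := hall d hd; simpa [pvDash] using this
    rw [hz']
    rw [pvRstrip_kill_dashes [c] z.length (by simpa using hc)]
    have : pvRstrip (List.replicate z.length '-') = [] := by
      have := pvRstrip_kill_dashes [] z.length (by simp)
      simpa using this
    rw [this]

-- the main bridge: A's collapse-of-stripped-map equals join of B's groups
theorem pvMain : ∀ (n : Nat) (t : List Char), t.length ≤ n →
    pvCollapse (pvStripDash (t.map pvG)) = PySem.Chars.join ['-'] (pvPGroup [] t) := by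
  intro n
  induction n with
  | zero =>
    intro t h
    have : t = [] := List.eq_nil_of_length_eq_zero (Nat.le_zero.mp h)
    subst this
    simp [pvStripDash, pvRstrip, pvCollapse, pvPGroup, pvJoin_nil]
  | succ N ih =>
    intro t hlen
    have hstep1 : pvStripDash (t.map pvG)
        = pvRstrip ((t.dropWhile (fun c => !pvTok c)).map pvG) := by
      rw [pvStripDash, pvDropDash_map]
    have hstep2 : pvPGroup [] t = pvPGroup [] (t.dropWhile (fun c => !pvTok c)) :=
      (pvPGroup_skip_nontok t).symm
    have ht1len : (t.dropWhile (fun c => !pvTok c)).length ≤ t.length :=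
      List.length_dropWhile_le _ _
    rw [hstep1, hstep2]
    match h1 : t.dropWhile (fun c => !pvTok c), ht1len with
    | [], _ => simp [pvRstrip, pvCollapse, pvPGroup, pvJoin_nil]
    | c :: cs, ht1len =>
      have hctok : pvTok c = true := by
        rcases pvDropWhile_head_shape (fun c => !pvTok c) t with h | ⟨c', t', heq, hp⟩
        · rw [h1] at h; exact absurd h (by simp)
        · rw [h1] at heq
          obtain ⟨rfl, -⟩ : c' = c ∧ t' = cs := by
            injection heq with h2 h3; exact ⟨h2.symm, h3.symm⟩
          simpa using hp
      obtain ⟨a, ha⟩ : ∃ a, a = (c :: cs).takeWhile pvTok := ⟨_, rfl⟩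
      obtain ⟨r, hr⟩ : ∃ r, r = (c :: cs).dropWhile pvTok := ⟨_, rfl⟩
      have hdecomp : c :: cs = a ++ r := by
        rw [ha, hr, List.takeWhile_append_dropWhile]
      have hane : a ≠ [] := by rw [ha]; simp [List.takeWhile_cons, hctok]
      have hatok : ∀ x ∈ a, pvTok x = true := by
        intro x hx; rw [ha] at hx; exact List.mem_takeWhile_imp hx
      have handash : ∀ x ∈ a, x ≠ '-' := by
        intro x hx
        have := pvTok_ne_dash (hatok x hx)
        simpa [pvDash] using this
      have hrshape : r = [] ∨ ∃ c' t', r = c' :: t' ∧ pvTok c' = false := by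
        rcases pvDropWhile_head_shape pvTok (c :: cs) with h | ⟨c', t', heq, hp⟩
        · exact Or.inl (by rw [hr]; exact h)
        · exact Or.inr ⟨c', t', by rw [hr]; exact heq, hp⟩
      -- group structure of the RHS
      have hRHS : pvPGroup [] (c :: cs) = a :: pvPGroup [] r := by
        rw [hdecomp, pvPGroup_tok_prefix a [] r hatok]
        rcases hrshape with hre | ⟨c', t', hrc, hcnt⟩
        · subst hre; simp [pvPGroup, List.isEmpty_iff, hane]
        · rw [hrc]
          simp [pvPGroup, hcnt, List.isEmpty_iff, hane]
      rw [hRHS]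
      have hmap : (c :: cs).map pvG = a ++ r.map pvG := by
        rw [hdecomp, List.map_append, pvMap_tok hatok]
      by_cases hrtok : ∀ x ∈ r, pvTok x = false
      · -- no token after a: the tail maps to dashes and is stripped away
        have hgr : pvPGroup [] r = [] := pvPGroup_all_nontok r hrtok
        rw [hgr, pvJoin_single, hmap, pvMap_nontok hrtok]
        rw [pvRstrip_kill_dashes a r.length (fun x hx => by simpa [pvDash] using handash x hx)]
        have := pvCollapse_append_nondash a [] handash
        simpa [pvCollapse] using this
      · -- r contains a token: split r into its nontok prefix b and rest r1
        have hex : ∃ x ∈ r, pvTok x = true := by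
          by_contra hno
          apply hrtok
          intro x hx
          by_contra hxx
          exact hno ⟨x, hx, by simpa using hxx⟩
        obtain ⟨e0, he0mem, he0⟩ := hex
        obtain ⟨b, hb⟩ : ∃ b, b = r.takeWhile (fun x => !pvTok x) := ⟨_, rfl⟩
        obtain ⟨r1, hr1⟩ : ∃ r1, r1 = r.dropWhile (fun x => !pvTok x) := ⟨_, rfl⟩
        have hrdecomp : r = b ++ r1 := by
          rw [hb, hr1, List.takeWhile_append_dropWhile]
        have hbnontok : ∀ x ∈ b, pvTok x = false := by
          intro x hx
          rw [hb] at hx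
          have := List.mem_takeWhile_imp hx
          simpa using this
        have hr1shape : ∃ e es, r1 = e :: es ∧ pvTok e = true := by
          rcases pvDropWhile_head_shape (fun x => !pvTok x) r with h | ⟨c', t', heq, hp⟩
          · exfalso
            have hall := List.dropWhile_eq_nil_iff.mp h
            have := hall e0 he0mem
            simp [he0] at this
          · exact ⟨c', t', by rw [hr1]; exact heq, by simpa using hp⟩
        obtain ⟨e, es, hr1eq, hetok⟩ := hr1shape
        have hbne : b ≠ [] := by
          rcases hrshape with hre | ⟨c', t', hrc, hcnt⟩
          · exfalso; rw [hre] at he0mem; exact absurd he0mem (by simp)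
          · rw [hb, hrc]; simp [List.takeWhile_cons, hcnt]
        have hmapr : r.map pvG = List.replicate b.length '-' ++ r1.map pvG := by
          rw [hrdecomp, List.map_append, pvMap_nontok hbnontok]
        have hmapr1head : r1.map pvG = pvG e :: es.map pvG := by rw [hr1eq]; simp
        have hgednd : pvDash (pvG e) = false := by
          rw [pvG_tok hetok]; exact pvTok_ne_dash hetok
        have hrst : pvRstrip (a ++ (List.replicate b.length '-' ++ r1.map pvG))
            = a ++ (List.replicate b.length '-' ++ pvRstrip (r1.map pvG)) := by
          have h2 : pvRstrip ((a ++ List.replicate b.length '-') ++ r1.map pvG)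
              = (a ++ List.replicate b.length '-') ++ pvRstrip (r1.map pvG) := by
            apply pvRstrip_append_keep
            exact ⟨pvG e, by rw [hmapr1head]; simp, hgednd⟩
          simpa [List.append_assoc] using h2
        have hwhead : pvRstrip (r1.map pvG) = pvG e :: pvRstrip (es.map pvG) := by
          rw [hmapr1head, pvRstrip_cons_nondash hgednd]
        -- apply the induction hypothesis to r1
        have hr1len : r1.length ≤ N := by
          have ha1 : 1 ≤ a.length := by
            match a, hane with
            | x :: xs, _ => simp
          have h3 := congrArg List.length hdecomp
          simp at h3
          have h4 : r1.length ≤ r.length := by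
            rw [hrdecomp]; simp
          have h5 : (c :: cs).length ≤ t.length := by
            rw [← h1]; exact List.length_dropWhile_le _ _
          simp at h5
          omega
        have hIH := ih r1 hr1len
        have hstrip_r1 : pvStripDash (r1.map pvG) = pvRstrip (r1.map pvG) := by
          rw [pvStripDash]
          have : List.dropWhile pvDash (r1.map pvG) = r1.map pvG := by
            rw [hmapr1head]
            simp [List.dropWhile_cons, hgednd]
          rw [this]
        rw [hstrip_r1] at hIH
        -- assemble
        have hgr1 : pvPGroup [] r = pvPGroup [] r1 := by
          rw [hr1]; exact (pvPGroup_skip_nontok r).symm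
        have hgr1ne : pvPGroup [] r1 ≠ [] := by
          rw [hr1eq]
          simp only [pvPGroup, hetok, if_pos rfl]
          exact pvPGroup_ne_nil es [e] (by simp)
        rw [hgr1, pvJoin_cons a _ hgr1ne, ← hIH]
        rw [hmap, hmapr, hrst]
        have hwshape : pvRstrip (r1.map pvG) = [] ∨
            ∃ c' t', pvRstrip (r1.map pvG) = c' :: t' ∧ c' ≠ '-' := by
          refine Or.inr ⟨pvG e, pvRstrip (es.map pvG), hwhead, ?_⟩
          simpa [pvDash] using hgednd
        rw [← List.append_assoc, List.append_assoc a,]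
        rw [pvCollapse_append_nondash a _ handash]
        rw [pvCollapse_dashes b.length _ (by match b, hbne with | x :: xs, _ => simp) hwshape]

-- ===== VERDICT (by name: the statement is the Claim_ definition above) =====
theorem normalize_job_id_py_spec : Claim_equal_normalize_job_id_py := by
  unfold Claim_equal_normalize_job_id_py
  intro raw _
  unfold Spec_normalize_job_id_py normalize_job_id_py normalize_job_id_py_alt
  by_cases h : (PySem.Chars.strip raw.toList).isEmpty = true
  · rw [if_pos h, if_pos h]
  · rw [if_neg h, if_neg h]
    dsimp only
    congr 1
    rw [pvAFold_eq, pvStripChars_eq, pvLoop_eq_collapse,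
      pvMain (PySem.Chars.strip raw.toList).length _ (le_refl _)]
    rw [pvBFold_eq (PySem.Chars.strip raw.toList) [] []]
    simp
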